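-- pv_equiv track=rewrite | github.com/hykilpikonna/CSC110 | assignments/a4/a4_part2.py | starting_coprime_numbers
-- ===== SOURCE A (Python) =====
-- import math
--
-- def starting_coprime_numbers(primes: set[int]) -> list[int]:
--     """Return the numbers up to the product of the given primes that are coprime to all of them.
--
--     Note: the length of the returned list is is exactly equal to phi(math.prod(primes)), where
--     phi is the Euler totient function.
--
--     Preconditions:
--         - primes != set()
--         - every element of primes is prime
--
--     >>> starting_coprime_numbers({2, 3})
--     [1, 5]
--     >>> starting_coprime_numbers({3, 11})
--     [1, 2, 4, 5, 7, 8, 10, 13, 14, 16, 17, 19, 20, 23, 25, 26, 28, 29, 31, 32]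
--     """
--     nums_so_far = []
--     m = math.prod(primes)
--
--     for k in range(1, m):
--         is_coprime = True
--         for p in primes:
--             if k % p == 0:
--                 is_coprime = False
--         if is_coprime:
--             list.append(nums_so_far, k)
--
--     return nums_so_far
-- ===== SOURCE B (Python) =====
-- import math
--
--
-- def starting_coprime_numbers(primes: set[int]) -> list[int]:
--     """Sieve: mark every multiple of each prime below m = prod(primes), collect the unmarked."""
--     m = math.prod(primes)
--     if m <= 1:
--         return []
--     coprime = [True] * m
--     for p in primes:
--         for multiple in range(0, m, abs(p)):
--             coprime[multiple] = False
--     return [k for k in range(1, m) if coprime[k]]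
-- ===== Notes on version B (the rewrite author's own statement) =====
-- stated objective: alternative
-- what changed: Replaces the per-number trial-division double loop (test every k in [1,m) against every prime) by a sieve: one boolean array of size m, mark the multiples of each prime by stepping, then collect the unmarked indices.
import Mathlib
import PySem

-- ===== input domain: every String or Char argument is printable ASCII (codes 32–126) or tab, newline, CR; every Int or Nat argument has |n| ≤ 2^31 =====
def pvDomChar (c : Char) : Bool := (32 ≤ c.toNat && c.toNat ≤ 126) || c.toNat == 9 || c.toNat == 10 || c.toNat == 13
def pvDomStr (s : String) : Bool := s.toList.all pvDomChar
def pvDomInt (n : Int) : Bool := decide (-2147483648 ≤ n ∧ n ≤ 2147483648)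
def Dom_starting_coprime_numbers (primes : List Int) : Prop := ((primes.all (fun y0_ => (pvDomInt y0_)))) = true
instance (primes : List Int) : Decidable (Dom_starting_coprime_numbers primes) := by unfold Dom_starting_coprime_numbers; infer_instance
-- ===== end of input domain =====

-- B replaces A's trial-division double loop by a sieve (mark multiples of each prime,
-- collect the unmarked); equivalence of the return values is proved below.

-- ===== PORT A =====
-- A: m = prod(primes); for k in range(1, m): test k % p for every p; append k if coprime.
def starting_coprime_numbers (primes : List Int) : List Int :=
  let m := primes.foldl (· * ·) 1
  (PySem.List.pyRange 1 m 1).foldl (fun nums k =>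
      let isCoprime := primes.foldl (fun b p => if PySem.Int.mod k p = 0 then false else b) true
      if isCoprime then nums ++ [k] else nums)
    []

-- ===== PORT B =====
-- B: sieve of size m; mark multiples of |p| for each p; collect the unmarked k in [1, m).
def starting_coprime_numbers_alt (primes : List Int) : List Int :=
  let m := primes.foldl (· * ·) 1
  if m ≤ 1 then []
  else
    let coprime := primes.foldl
      (fun (arr : List Bool) p =>
        (PySem.List.pyRange 0 m |p|).foldl (fun a mult => PySem.List.pySetD a mult false) arr)
      (List.replicate m.toNat true)
    (PySem.List.pyRange 1 m 1).filter (fun k => PySem.List.pyGetD coprime k false)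

-- ===== PRECONDITION & SPEC =====
def Spec_starting_coprime_numbers (primes : List Int) (out : List Int) : Prop := out = starting_coprime_numbers_alt primes
instance (primes : List Int) (out : List Int) : Decidable (Spec_starting_coprime_numbers primes out) := by unfold Spec_starting_coprime_numbers; infer_instance

-- ===== CLAIM (what is proved, stated in full; the proofs are below) =====
def Claim_equal_starting_coprime_numbers : Prop := ∀ (primes : List Int), Dom_starting_coprime_numbers primes → Spec_starting_coprime_numbers primes (starting_coprime_numbers primes)

-- ===== LEMMAS AND PROOFS =====

-- A's inner flag loop computes "no p in primes divides k".
theorem innerFlag_eq (primes : List Int) (k : Int) (b : Bool) :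
    primes.foldl (fun b p => if PySem.Int.mod k p = 0 then false else b) b
      = (b && primes.all (fun p => !(decide (p ∣ k)))) := by
  induction primes generalizing b with
  | nil => simp
  | cons p rest ih =>
    simp only [List.foldl_cons, List.all_cons, ih]
    by_cases h : PySem.Int.mod k p = 0
    · have : p ∣ k := (PySem.Int.mod_eq_zero_iff_dvd k p).1 h
      simp [h, this]
    · have : ¬ p ∣ k := fun hd => h ((PySem.Int.mod_eq_zero_iff_dvd k p).2 hd)
      simp [h, this]

-- Reading a cell after a pySetD at a nonnegative index.
theorem pyGetD_pySetD_of_nonneg (xs : List Bool) (i j : Int) (v d : Bool)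
    (hi : 0 ≤ i) (hj : 0 ≤ j) :
    PySem.List.pyGetD (PySem.List.pySetD xs i v) j d
      = if j = i ∧ i < (xs.length : Int) then v else PySem.List.pyGetD xs j d := by
  rw [PySem.List.pySetD_of_nonneg xs v hi,
      PySem.List.pyGetD_of_nonneg _ d hj, PySem.List.pyGetD_of_nonneg xs d hj,
      List.getD_eq_getElem?_getD, List.getD_eq_getElem?_getD, List.getElem?_set]
  by_cases hji : j = i ∧ i < (xs.length : Int)
  · rw [if_pos hji]
    obtain ⟨rfl, hlt⟩ := hji
    simp [show j.toNat < xs.length by omega]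
  · rw [if_neg hji]
    by_cases hji' : i.toNat = j.toNat
    · have hne : ¬ (i.toNat < xs.length) := by
        intro hlt; exact hji ⟨by omega, by omega⟩
      simp [hji', show ¬ j.toNat < xs.length by omega]
    · simp [hji']

-- Marking along a list of nonnegative indices: a cell is false iff its index was hit.
theorem pyGetD_foldl_mark (l : List Int) (arr : List Bool) (k : Int)
    (hl : ∀ i ∈ l, 0 ≤ i) (hk : 0 ≤ k) :
    PySem.List.pyGetD (l.foldl (fun a i => PySem.List.pySetD a i false) arr) k false
      = if k ∈ l ∧ k < (arr.length : Int) then false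
        else PySem.List.pyGetD arr k false := by
  induction l generalizing arr with
  | nil => simp
  | cons i rest ih =>
    have hi : 0 ≤ i := hl i (List.mem_cons_self ..)
    have hlen : ((PySem.List.pySetD arr i false).length : Int) = (arr.length : Int) := by
      rw [PySem.List.length_pySetD]
    simp only [List.foldl_cons]
    rw [ih _ (fun j hj => hl j (List.mem_cons_of_mem _ hj)), hlen,
        pyGetD_pySetD_of_nonneg arr i k false false hi hk]
    by_cases hmem : k ∈ rest ∧ k < (arr.length : Int)
    · simp [hmem, List.mem_cons]
    · rw [if_neg hmem]
      by_cases hki : k = i ∧ i < (arr.length : Int)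
      · rw [if_pos hki]
        have : k ∈ i :: rest ∧ k < (arr.length : Int) := by
          exact ⟨List.mem_cons.2 (Or.inl hki.1), hki.1 ▸ hki.2⟩
        rw [if_pos this]
      · rw [if_neg hki]
        have : ¬ (k ∈ i :: rest ∧ k < (arr.length : Int)) := by
          rintro ⟨hmem', hlt⟩
          rcases List.mem_cons.1 hmem' with rfl | hr
          · exact hki ⟨rfl, hlt⟩
          · exact hmem ⟨hr, hlt⟩
        rw [if_neg this]

-- The whole sieve: a cell k in [0, m) is true iff no prime's absolute value divides k.
theorem sieve_get (primes : List Int) (m : Int) (arr : List Bool) (k : Int)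
    (hp : ∀ p ∈ primes, p ≠ 0) (hk0 : 0 ≤ k) (hkm : k < m)
    (hlen : (arr.length : Int) = m) :
    PySem.List.pyGetD
        (primes.foldl
          (fun (a : List Bool) p =>
            (PySem.List.pyRange 0 m |p|).foldl (fun a' mult => PySem.List.pySetD a' mult false) a)
          arr) k false
      = (PySem.List.pyGetD arr k false && primes.all (fun p => !(decide (p ∣ k)))) := by
  induction primes generalizing arr with
  | nil => simp
  | cons p rest ih =>
    have hp0 : p ≠ 0 := hp p (List.mem_cons_self ..)
    have habs : (0:Int) < |p| := abs_pos.2 hp0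
    have hfix : ∀ (l : List Int) (a : List Bool),
        ((l.foldl (fun a' mult => PySem.List.pySetD a' mult false) a)).length = a.length := by
      intro l
      induction l with
      | nil => intro a; rfl
      | cons x xs ihl => intro a; simp [List.foldl_cons, ihl, PySem.List.length_pySetD]
    have hlen' : ((((PySem.List.pyRange 0 m |p|).foldl
        (fun a' mult => PySem.List.pySetD a' mult false) arr)).length : Int) = m := by
      rw [hfix]; exact hlen
    simp only [List.foldl_cons, List.all_cons]
    rw [ih _ (fun q hq => hp q (List.mem_cons_of_mem _ hq)) hlen',
        pyGetD_foldl_mark _ _ _ (fun i hi => by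
          have := (PySem.List.mem_pyRange_iff_of_pos habs i).1 hi
          omega) hk0, hlen]
    have hmem : k ∈ PySem.List.pyRange 0 m |p| ↔ (p ∣ k) := by
      rw [PySem.List.mem_pyRange_iff_of_pos habs k]
      constructor
      · rintro ⟨hle, hlt, hd⟩
        rw [show k - 0 = k by ring] at hd
        exact (abs_dvd p k).1 hd
      · intro hd
        exact ⟨hk0, hkm, by rw [show k - 0 = k by ring]; exact (abs_dvd p k).2 hd⟩
    by_cases hd : p ∣ k
    · simp [hmem, hd, hkm]
    · simp only [hmem]
      simp [hd, hkm]

-- A nonzero product forces every factor nonzero.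
theorem mem_ne_zero_of_prod_ne_zero (primes : List Int)
    (h : primes.foldl (· * ·) 1 ≠ 0) : ∀ p ∈ primes, p ≠ 0 := by
  intro p hp hp0
  apply h
  have hdvd : p ∣ primes.foldl (· * ·) 1 := by
    rw [← List.prod_eq_foldl]
    exact List.dvd_prod hp
  subst hp0
  exact zero_dvd_iff.1 hdvd

-- ===== VERDICT (by name: the statement is the Claim_ definition above) =====
set_option maxHeartbeats 1000000 in
theorem starting_coprime_numbers_spec : Claim_equal_starting_coprime_numbers := by
  intro primes _
  unfold Spec_starting_coprime_numbers starting_coprime_numbers starting_coprime_numbers_alt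
  show (PySem.List.pyRange 1 (primes.foldl (· * ·) 1)).foldl (fun nums k =>
      if (primes.foldl (fun b p => if PySem.Int.mod k p = 0 then false else b) true) = true
      then nums ++ [k] else nums) []
    = if primes.foldl (· * ·) 1 ≤ 1 then []
      else (PySem.List.pyRange 1 (primes.foldl (· * ·) 1)).filter
        (fun k => PySem.List.pyGetD
          (primes.foldl (fun (arr : List Bool) p =>
            (PySem.List.pyRange 0 (primes.foldl (· * ·) 1) |p|).foldl
              (fun a mult => PySem.List.pySetD a mult false) arr)
            (List.replicate (primes.foldl (· * ·) 1).toNat true)) k false)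
  set m := primes.foldl (· * ·) 1 with hm
  by_cases hm1 : m ≤ 1
  · rw [PySem.List.pyRange_one_eq_nil hm1, if_pos hm1]
    rfl
  · have hmne : m ≠ 0 := by omega
    have hp0 := mem_ne_zero_of_prod_ne_zero primes (hm ▸ hmne)
    rw [if_neg hm1]
    rw [PySem.List.foldl_append_if_eq_filter
        (fun k => primes.foldl (fun b p => if PySem.Int.mod k p = 0 then false else b) true)
        (PySem.List.pyRange 1 m) []]
    rw [List.nil_append]
    apply List.filter_congr
    intro k hk
    have hk' := PySem.List.mem_pyRange_one.1 hk
    rw [innerFlag_eq,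
        sieve_get primes m (List.replicate m.toNat true) k hp0 (by omega) (by omega)
          (by simp; omega)]
    rw [PySem.List.pyGetD_of_nonneg _ false (by omega : (0:Int) ≤ k)]
    rw [List.getD_eq_getElem?_getD, List.getElem?_replicate]
    rw [if_pos (by omega : k.toNat < m.toNat)]
    simp
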